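-- pv_equiv track=rewrite | github.com/Mijan/NN-CTMC | src/Models/utils.py | getUniqueStoichiometryMapping
-- ===== SOURCE A (Python) =====
-- def getUniqueStoichiometryMapping(stoich):
--     mapping = [None] * len(stoich)
--     stoich_to_rct = {}
--     unique_rct_nbr = 0
--
--     for rct_nbr, stoich_vec in enumerate(stoich):
--         stoich_tuple = tuple(stoich_vec)
--
--         if stoich_tuple not in stoich_to_rct:
--             stoich_to_rct[stoich_tuple] = unique_rct_nbr
--             unique_rct_nbr += 1
--
--         mapping[rct_nbr] = stoich_to_rct[stoich_tuple]
--
--     return mapping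
-- ===== SOURCE B (Python) =====
-- def getUniqueStoichiometryMapping(stoich):
--     # No dict/counter: an element's unique index equals the number of distinct
--     # vectors in the prefix ending at its first occurrence, minus one.
--     return [len({tuple(u) for u in stoich[:stoich.index(v) + 1]}) - 1
--             for v in stoich]
-- ===== Notes on version B (the rewrite author's own statement) =====
-- stated objective: alternative
-- what changed: Drops the dict/counter state entirely: each element's index is computed by a closed-form per-element expression, the number of distinct vectors in the prefix ending at the element's first occurrence (list.index) minus one, instead of being assigned by an incremental tuple-keyed dict.
import Mathlib
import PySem

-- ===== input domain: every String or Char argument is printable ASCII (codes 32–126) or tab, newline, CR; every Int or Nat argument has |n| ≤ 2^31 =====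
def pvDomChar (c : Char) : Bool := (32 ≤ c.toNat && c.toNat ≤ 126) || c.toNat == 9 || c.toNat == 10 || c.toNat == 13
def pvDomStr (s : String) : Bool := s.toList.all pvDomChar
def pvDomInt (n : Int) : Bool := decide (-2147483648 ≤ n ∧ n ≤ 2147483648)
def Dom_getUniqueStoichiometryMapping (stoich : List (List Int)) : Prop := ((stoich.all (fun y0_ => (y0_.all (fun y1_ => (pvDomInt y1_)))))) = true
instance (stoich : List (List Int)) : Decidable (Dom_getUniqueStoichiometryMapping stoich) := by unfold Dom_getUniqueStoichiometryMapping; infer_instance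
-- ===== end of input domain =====

-- B drops A's incremental dict/counter state: each element's index is the number of
-- distinct vectors in the prefix ending at its first occurrence, minus one.

-- ===== PORT A =====
-- A's loop: mapping is filled slot by slot in traversal order (mapping[rct_nbr] = …),
-- which the port renders as appending in order; stoich_to_rct[stoich_tuple] is ported
-- as getD _ 0 — the key is always present at that point, so no KeyError can occur.
def getUniqueStoichiometryMapping (stoich : List (List Int)) : List Int :=
  (stoich.foldl
    (fun (st : List Int × PySem.Dict (List Int) Int × Int) v =>
      let mapping := st.1
      let d0 := st.2.1
      let n0 := st.2.2
      let d := if d0.contains v then d0 else d0.insert v n0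
      let n := if d0.contains v then n0 else n0 + 1
      (mapping ++ [d.getD v 0], d, n))
    ([], PySem.Dict.empty, 0)).1

-- ===== PORT B =====
-- Source B: a single comprehension; stoich.index(v) is ported as (index? …).getD 0 —
-- v is always an element of stoich, so no ValueError can occur; the set
-- comprehension {tuple(u) for u in stoich[:i+1]} is PySem.Set.ofList of the slice.
def getUniqueStoichiometryMapping_alt (stoich : List (List Int)) : List Int :=
  stoich.map (fun v =>
    ((PySem.Set.ofList
        (PySem.List.slice stoich none
          (some ((((PySem.List.index? stoich v).getD 0 : Nat) : Int) + 1)))).length : Int) - 1)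

-- ===== PRECONDITION & SPEC =====
def Spec_getUniqueStoichiometryMapping (stoich : List (List Int)) (out : List Int) : Prop := out = getUniqueStoichiometryMapping_alt stoich
instance (stoich : List (List Int)) (out : List Int) : Decidable (Spec_getUniqueStoichiometryMapping stoich out) := by unfold Spec_getUniqueStoichiometryMapping; infer_instance

-- ===== CLAIM (what is proved, stated in full; the proofs are below) =====
def Claim_equal_getUniqueStoichiometryMapping : Prop := ∀ (stoich : List (List Int)), Dom_getUniqueStoichiometryMapping stoich → Spec_getUniqueStoichiometryMapping stoich (getUniqueStoichiometryMapping stoich)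

-- ===== LEMMAS AND PROOFS =====

-- the reference value: the (optional) index of v in the ordered dedup u
def pvRef (u : List (List Int)) (v : List Int) : Option Int :=
  (PySem.List.index? u v).map Int.ofNat

-- A's dict state, named for the proofs
def pvTable (u : List (List Int)) : PySem.Dict (List Int) Int :=
  PySem.Dict.ofList ((PySem.List.enumerate u).map (fun p => (p.2, p.1)))

theorem pvRef_isSome_iff (u : List (List Int)) (v : List Int) :
    (pvRef u v).isSome = true ↔ v ∈ u := by
  cases h : PySem.List.index? u v with
  | none =>
      simp only [pvRef, h, Option.map_none, Option.isSome_none, Bool.false_eq_true, false_iff]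
      exact (PySem.List.index?_eq_none_iff u v).mp h
  | some k =>
      simp only [pvRef, h, Option.map_some, Option.isSome_some, true_iff]
      exact (PySem.List.index?_isSome_iff u v).mp (by rw [h]; rfl)

theorem map_fst_swap_enumerate (u : List (List Int)) :
    ((PySem.List.enumerate u).map (fun p => (p.2, p.1))).map (fun q => q.1) = u := by
  rw [List.map_map]
  exact PySem.List.map_snd_enumerate u 0

theorem table_items (u : List (List Int)) (hu : u.Nodup) :
    (pvTable u).items = (PySem.List.enumerate u).map (fun p => (p.2, p.1)) := by
  have h := PySem.Dict.items_foldl_insert_fresh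
    ((PySem.List.enumerate u).map (fun p => (p.2, p.1)))
    (fun p => p.1) (fun p => p.2) (PySem.Dict.empty)
    (by intro a _; simp [PySem.Dict.contains_empty])
    (by rw [show List.map (fun p => p.1) ((PySem.List.enumerate u).map (fun p => (p.2, p.1)))
            = u from map_fst_swap_enumerate u]; exact hu)
  simpa [pvTable, PySem.Dict.ofList, PySem.Dict.update] using h

theorem table_keys (u : List (List Int)) (hu : u.Nodup) : (pvTable u).keys = u := by
  show ((pvTable u).items).map (·.1) = u
  rw [table_items u hu]
  exact map_fst_swap_enumerate u

theorem table_get? (u : List (List Int)) (hu : u.Nodup) (v : List Int) :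
    (pvTable u).get? v = pvRef u v := by
  by_cases hv : v ∈ u
  · obtain ⟨k, hk⟩ := Option.isSome_iff_exists.mp ((PySem.List.index?_isSome_iff u v).mpr hv)
    obtain ⟨hlt, hget, -⟩ := PySem.List.getElem_of_index?_eq_some hk
    have hmem : (v, (k : Int)) ∈ (PySem.List.enumerate u).map (fun p => (p.2, p.1)) := by
      refine List.mem_map.mpr ⟨((k : Int), v), ?_, rfl⟩
      rw [PySem.List.mem_enumerate_iff]
      exact ⟨k, hlt, by simp [hget]⟩
    rw [PySem.Dict.get?_of_mem_items _ (by rw [table_items u hu]; exact hmem)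
          (by rw [pvTable]; exact PySem.Dict.nodup_keys_ofList _)]
    unfold pvRef; rw [hk]; rfl
  · rw [(PySem.Dict.get?_eq_none_iff_not_mem_keys _ _).mpr (by rw [table_keys u hu]; exact hv)]
    rw [pvRef, (PySem.List.index?_eq_none_iff u v).mpr hv, Option.map_none]

theorem pvTable_contains (u : List (List Int)) (hu : u.Nodup) (v : List Int) :
    (pvTable u).contains v = decide (v ∈ u) := by
  rw [PySem.Dict.contains_eq_isSome_get?, table_get? u hu]
  by_cases hv : v ∈ u
  · simp [hv, (pvRef_isSome_iff u v).mpr hv]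
  · simp only [hv, decide_false]
    rw [show pvRef u v = none from by
      unfold pvRef; rw [(PySem.List.index?_eq_none_iff u v).mpr hv]; rfl]
    rfl

theorem dedup_append_mem (l : List (List Int)) (x : List Int) (hx : x ∈ l) :
    PySem.List.dedup (l ++ [x]) = PySem.List.dedup l := by
  rw [PySem.List.dedup_eq_ofList, PySem.List.dedup_eq_ofList, PySem.Set.ofList_append_singleton]
  exact PySem.Set.add_of_mem ((PySem.Set.mem_ofList l x).mpr hx)

theorem dedup_append_not_mem (l : List (List Int)) (x : List Int) (hx : x ∉ l) :
    PySem.List.dedup (l ++ [x]) = PySem.List.dedup l ++ [x] := by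
  rw [PySem.List.dedup_eq_ofList, PySem.List.dedup_eq_ofList, PySem.Set.ofList_append_singleton]
  exact PySem.Set.add_of_not_mem (fun h => hx ((PySem.Set.mem_ofList l x).mp h))

theorem nodup_dedup' (l : List (List Int)) : (PySem.List.dedup l).Nodup := by
  rw [PySem.List.dedup_eq_ofList]; exact PySem.Set.nodup_ofList l

theorem pvTable_insert (l : List (List Int)) (x : List Int) (hx : x ∉ l) :
    pvTable (PySem.List.dedup (l ++ [x]))
      = (pvTable (PySem.List.dedup l)).insert x ((PySem.List.dedup l).length : Int) := by
  have hxd : x ∉ PySem.List.dedup l := fun h => hx ((PySem.List.mem_dedup l x).mp h)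
  apply PySem.Dict.ext
  rw [table_items _ (by rw [dedup_append_not_mem l x hx]; exact (nodup_dedup' l).append (List.nodup_singleton x) (by simpa using hxd))]
  rw [PySem.Dict.items_insert_of_not_contains _ _ (by rw [pvTable_contains _ (nodup_dedup' l) x]; simpa using hxd)]
  rw [table_items _ (nodup_dedup' l)]
  rw [dedup_append_not_mem l x hx, PySem.List.enumerate_append, List.map_append]
  congr 1
  simp [PySem.List.enumerate_cons]

theorem pvRef_append_singleton_self (u : List (List Int)) (x : List Int) (hx : x ∉ u) :
    pvRef (u ++ [x]) x = some (u.length : Int) := by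
  unfold pvRef
  rw [PySem.List.index?_append_singleton_self u x hx]; rfl

theorem foldA_inv (l : List (List Int)) :
    (l.foldl
      (fun (st : List Int × PySem.Dict (List Int) Int × Int) v =>
        let mapping := st.1
        let d0 := st.2.1
        let n0 := st.2.2
        let d := if d0.contains v then d0 else d0.insert v n0
        let n := if d0.contains v then n0 else n0 + 1
        (mapping ++ [d.getD v 0], d, n))
      ([], PySem.Dict.empty, 0))
    = (l.map (fun v => (pvRef (PySem.List.dedup l) v).getD 0),
       pvTable (PySem.List.dedup l),
       ((PySem.List.dedup l).length : Int)) := by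
  induction l using List.reverseRecOn with
  | nil => rfl
  | append_singleton l x IH =>
    rw [List.foldl_append, List.foldl_cons, List.foldl_nil, IH]
    by_cases hx : x ∈ l
    · have hxd : x ∈ PySem.List.dedup l := (PySem.List.mem_dedup l x).mpr hx
      rw [dedup_append_mem l x hx]
      dsimp only
      rw [pvTable_contains _ (nodup_dedup' l) x, decide_eq_true hxd, if_pos rfl, if_pos rfl,
          List.map_append]
      refine congrArg (fun m => (m, _, _)) ?_
      congr 1
      simp only [List.map_cons, List.map_nil]
      rw [PySem.Dict.getD_eq_get?_getD, table_get? _ (nodup_dedup' l)]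
    · have hxd : x ∉ PySem.List.dedup l := fun h => hx ((PySem.List.mem_dedup l x).mp h)
      dsimp only
      rw [pvTable_contains _ (nodup_dedup' l) x, decide_eq_false hxd, if_neg (by simp), if_neg (by simp)]
      rw [pvTable_insert l x hx, dedup_append_not_mem l x hx]
      refine congrArg₂ (fun m p => (m, p)) ?_ (congrArg₂ Prod.mk rfl (by simp))
      rw [List.map_append]
      congr 1
      · refine List.map_congr_left (fun v hv => ?_)
        have hvd : v ∈ PySem.List.dedup l := (PySem.List.mem_dedup l v).mpr hv
        unfold pvRef
        rw [PySem.List.index?_append_of_mem [x] hvd]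
      · simp only [List.map_cons, List.map_nil]
        rw [PySem.Dict.getD_insert_self, pvRef_append_singleton_self _ x hxd]
        rfl

-- dedup of a longer list extends dedup of a prefix
theorem dedup_append_prefix (x y : List (List Int)) :
    ∃ r, PySem.List.dedup (x ++ y) = PySem.List.dedup x ++ r := by
  induction y using List.reverseRecOn with
  | nil => exact ⟨[], by simp⟩
  | append_singleton y e IH =>
    obtain ⟨r, hr⟩ := IH
    rw [← List.append_assoc]
    by_cases he : e ∈ x ++ y
    · exact ⟨r, by rw [dedup_append_mem _ e he, hr]⟩
    · exact ⟨r ++ [e], by rw [dedup_append_not_mem _ e he, hr, List.append_assoc]⟩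

-- the key bridge: A's assigned index for v equals B's prefix-distinct count minus one
theorem pvRef_eq_prefix_count (l : List (List Int)) (v : List Int) (f : Nat)
    (hf : PySem.List.index? l v = some f) :
    (pvRef (PySem.List.dedup l) v).getD 0
      = ((PySem.Set.ofList (l.take (f + 1))).length : Int) - 1 := by
  obtain ⟨p, s, hl, hp, hv⟩ := (PySem.List.index?_eq_some_iff l v f).mp hf
  have hvd : v ∉ PySem.List.dedup p := fun h => hv ((PySem.List.mem_dedup p v).mp h)
  have htake : l.take (f + 1) = p ++ [v] := by
    subst hl; subst hp
    rw [List.take_append]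
    simp
  have hofl : PySem.Set.ofList (l.take (f + 1)) = PySem.List.dedup p ++ [v] := by
    rw [htake, ← PySem.List.dedup_eq_ofList, dedup_append_not_mem p v hv]
  have hdl : ∃ r, PySem.List.dedup l = (PySem.List.dedup p ++ [v]) ++ r := by
    obtain ⟨r, hr⟩ := dedup_append_prefix (p ++ [v]) s
    refine ⟨r, ?_⟩
    rw [show l = (p ++ [v]) ++ s from by rw [hl]; simp, hr,
        dedup_append_not_mem p v hv]
  obtain ⟨r, hr⟩ := hdl
  have hidx : PySem.List.index? (PySem.List.dedup l) v
      = some (PySem.List.dedup p).length := by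
    rw [hr, PySem.List.index?_append_of_mem r (by simp),
        PySem.List.index?_append_singleton_self _ v hvd]
  unfold pvRef
  rw [hidx, hofl]
  simp

-- ===== VERDICT (by name: the statement is the Claim_ definition above) =====
theorem getUniqueStoichiometryMapping_spec : Claim_equal_getUniqueStoichiometryMapping := by
  intro stoich _
  unfold Spec_getUniqueStoichiometryMapping getUniqueStoichiometryMapping getUniqueStoichiometryMapping_alt
  rw [foldA_inv]
  refine List.map_congr_left (fun v hv => ?_)
  obtain ⟨f, hf⟩ := Option.isSome_iff_exists.mp ((PySem.List.index?_isSome_iff stoich v).mpr hv)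
  rw [hf]
  simp only [Option.getD_some]
  rw [show (((f : Nat) : Int) + 1) = (((f + 1 : Nat) : Int)) from by push_cast; ring,
      PySem.List.slice_to_natCast]
  exact pvRef_eq_prefix_count stoich v f hf
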